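-- pv_equiv track=rewrite | github.com/opinionated-systems/hyperspace | replication/results/replication_v1/arm_c_random/seed44/gen_54/repo/task_agent.py | _fix_single_quotes
-- ===== SOURCE A (Python) =====
-- def _fix_single_quotes(text: str) -> str:
--     """Fix single quotes to double quotes, being careful about apostrophes."""
--     result = []
--     in_string = False
--     string_char = None
--
--     for char in text:
--         if not in_string:
--             if char == '"':
--                 in_string = True
--                 string_char = '"'
--                 result.append(char)
--             elif char == "'":
--                 # Convert single quote to double quote
--                 result.append('"')
--             else:
--                 result.append(char)
--         else:
--             if char == string_char:
--                 in_string = False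
--                 string_char = None
--             result.append(char)
--
--     return ''.join(result)
-- ===== SOURCE B (Python) =====
-- def _fix_single_quotes(text: str) -> str:
--     parts = text.split('"')
--     return '"'.join(p.replace("'", '"') if i % 2 == 0 else p
--                     for i, p in enumerate(parts))
-- ===== Notes on version B (the rewrite author's own statement) =====
-- stated objective: faster
-- what changed: Replaced the per-character in_string state machine by splitting the text at double-quote delimiters, converting single quotes only in the even-indexed (outside-string) segments, and rejoining, since only double quotes toggle the state.
import Mathlib
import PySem

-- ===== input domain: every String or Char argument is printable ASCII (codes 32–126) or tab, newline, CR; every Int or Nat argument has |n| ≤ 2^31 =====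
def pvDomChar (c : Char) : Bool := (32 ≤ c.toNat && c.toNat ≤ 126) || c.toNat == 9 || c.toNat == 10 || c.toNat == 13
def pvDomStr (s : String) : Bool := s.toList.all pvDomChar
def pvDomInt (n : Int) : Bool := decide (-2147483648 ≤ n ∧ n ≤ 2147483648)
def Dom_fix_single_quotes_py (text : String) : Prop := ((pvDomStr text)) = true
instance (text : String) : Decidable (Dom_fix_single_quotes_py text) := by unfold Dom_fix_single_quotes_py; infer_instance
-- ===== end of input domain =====

-- B replaces A's per-character in_string state machine by split-at-double-quotes / transform-segments-by-parity / rejoin (measured faster in a timing run; same O(n)).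

-- ===== PORT A =====
-- literal port of A's loop: state = (result, in_string, string_char), one step per character
def pvStepA (st : List Char × Bool × Option Char) (char : Char) : List Char × Bool × Option Char :=
  let (result, in_string, string_char) := st
  if !in_string then
    if char = '"' then (result ++ [char], true, some '"')
    else if char = '\'' then (result ++ ['"'], in_string, string_char)
    else (result ++ [char], in_string, string_char)
  else
    if some char = string_char then (result ++ [char], false, none)
    else (result ++ [char], in_string, string_char)

def fix_single_quotes_py (text : String) : String :=
  String.mk (text.toList.foldl pvStepA ([], false, none)).1

-- ===== PORT B =====
-- port of Source B: parts = text.split('"'); '"'.join(p.replace("'", '"') if i % 2 == 0 else p for i, p in enumerate(parts))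
def fix_single_quotes_py_alt (text : String) : String :=
  String.mk (PySem.Chars.join ['"']
    ((PySem.List.enumerate (PySem.Chars.splitOn text.toList ['"'])).map
      (fun ip => if PySem.Int.mod ip.1 2 = 0 then PySem.Chars.replace ip.2 ['\''] ['"'] else ip.2)))

-- ===== PRECONDITION & SPEC =====
def Spec_fix_single_quotes_py (text : String) (out : String) : Prop := out = fix_single_quotes_py_alt text
instance (text : String) (out : String) : Decidable (Spec_fix_single_quotes_py text out) := by unfold Spec_fix_single_quotes_py; infer_instance

-- ===== CLAIM (what is proved, stated in full; the proofs are below) =====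
def Claim_equal_fix_single_quotes_py : Prop := ∀ (text : String), Dom_fix_single_quotes_py text → Spec_fix_single_quotes_py text (fix_single_quotes_py text)

-- ===== LEMMAS AND PROOFS =====

-- outside-string character conversion
def pvRepC (c : Char) : Char := if c = '\'' then '"' else c

-- structural version of text.split('"')
def pvMsplit : List Char → List (List Char)
  | [] => [[]]
  | c :: s =>
    if c = '"' then [] :: pvMsplit s
    else match pvMsplit s with
      | [] => [[c]]
      | h :: t => (c :: h) :: t

theorem pvMsplit_ne_nil (s : List Char) : pvMsplit s ≠ [] := by
  cases s with
  | nil => simp [pvMsplit]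
  | cons c s =>
    simp only [pvMsplit]
    split
    · simp
    · split <;> simp_all

-- prepend p to the head segment
def pvPref (p : List Char) : List (List Char) → List (List Char)
  | [] => [p]
  | h :: t => (p ++ h) :: t

theorem pvSplitOn_go (s : List Char) : ∀ (fuel : Nat) (cur : List Char) (acc : List (List Char)),
    s.length < fuel →
    PySem.Chars.splitOn.go ['"'] fuel s cur acc = acc.reverse ++ pvPref cur.reverse (pvMsplit s) := by
  induction s with
  | nil =>
    intro fuel cur acc h
    cases fuel with
    | zero => omega
    | succ f => simp [PySem.Chars.splitOn.go, pvMsplit, pvPref]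
  | cons c s ih =>
    intro fuel cur acc h
    cases fuel with
    | zero => omega
    | succ f =>
      simp only [PySem.Chars.splitOn.go]
      by_cases hc : c = '"'
      · subst hc
        have hp : List.isPrefixOf ['"'] ('"' :: s) = true := by simp [List.isPrefixOf]
        rw [if_pos hp]
        simp only [List.length_cons] at h
        simp only [List.length_cons, List.length_nil, List.drop_succ_cons, List.drop_zero]
        rw [ih f [] (cur.reverse :: acc) (by omega)]
        rw [show pvMsplit ('"' :: s) = [] :: pvMsplit s from by simp [pvMsplit]]
        cases hms : pvMsplit s with
        | nil => exact absurd hms (pvMsplit_ne_nil s)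
        | cons h t => simp [pvPref]
      · have hp : List.isPrefixOf ['"'] (c :: s) = false := by
          simp [List.isPrefixOf]
          exact fun hcq => absurd hcq.symm hc
        rw [if_neg (by simp [hp])]
        simp only [List.length_cons] at h
        rw [ih f (c :: cur) acc (by omega)]
        simp only [pvMsplit, if_neg hc]
        cases hms : pvMsplit s with
        | nil => exact absurd hms (pvMsplit_ne_nil s)
        | cons hd t => simp [pvPref]

theorem pvSplitOn_eq (s : List Char) : PySem.Chars.splitOn s ['"'] = pvMsplit s := by
  have := pvSplitOn_go s (s.length + 1) [] [] (by omega)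
  simp only [PySem.Chars.splitOn] at *
  rw [this]
  cases hms : pvMsplit s with
  | nil => exact absurd hms (pvMsplit_ne_nil s)
  | cons h t => simp [pvPref]

theorem pvReplace_go (s : List Char) : ∀ (fuel : Nat) (acc : List Char), s.length ≤ fuel →
    PySem.Chars.replace.go ['\''] ['"'] fuel s acc = acc.reverse ++ s.map pvRepC := by
  induction s with
  | nil =>
    intro fuel acc h
    cases fuel <;> simp [PySem.Chars.replace.go]
  | cons c s ih =>
    intro fuel acc h
    cases fuel with
    | zero => simp at h
    | succ f =>
      simp only [PySem.Chars.replace.go]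
      by_cases hc : c = '\''
      · subst hc
        have hp : List.isPrefixOf ['\''] ('\'' :: s) = true := by simp [List.isPrefixOf]
        rw [if_pos hp]
        simp only [List.length_cons] at h
        simp only [List.length_cons, List.length_nil, List.drop_succ_cons, List.drop_zero]
        rw [ih f _ (by omega)]
        simp [pvRepC]
      · have hp : List.isPrefixOf ['\''] (c :: s) = false := by
          simp [List.isPrefixOf]
          exact fun hcq => absurd hcq.symm hc
        rw [if_neg (by simp [hp])]
        simp only [List.length_cons] at h
        rw [ih f _ (by omega)]
        simp [pvRepC, hc]

theorem pvReplace_eq (s : List Char) : PySem.Chars.replace s ['\''] ['"'] = s.map pvRepC := by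
  simp only [PySem.Chars.replace]
  rw [if_neg (by simp)]
  exact pvReplace_go s s.length [] (le_refl _)

-- what A's state machine produces (outside = true ↔ not in_string)
def pvG (outside : Bool) : List Char → List Char
  | [] => []
  | c :: s =>
    if c = '"' then '"' :: pvG (!outside) s
    else (if outside then pvRepC c else c) :: pvG outside s

-- reduction lemmas for one step of A's loop
theorem pvStepA_out_quote (r : List Char) :
    pvStepA (r, false, none) '"' = (r ++ ['"'], true, some '"') := by
  simp [pvStepA]

theorem pvStepA_out_sq (r : List Char) :
    pvStepA (r, false, none) '\'' = (r ++ ['"'], false, none) := by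
  simp [pvStepA]

theorem pvStepA_out_other (r : List Char) (c : Char) (hc : c ≠ '"') (hq : c ≠ '\'') :
    pvStepA (r, false, none) c = (r ++ [c], false, none) := by
  simp [pvStepA, hc, hq]

theorem pvStepA_in_quote (r : List Char) :
    pvStepA (r, true, some '"') '"' = (r ++ ['"'], false, none) := by
  simp [pvStepA]

theorem pvStepA_in_other (r : List Char) (c : Char) (hc : c ≠ '"') :
    pvStepA (r, true, some '"') c = (r ++ [c], true, some '"') := by
  simp [pvStepA, hc]

theorem pvFoldA (s : List Char) : ∀ (acc : List Char),
    (s.foldl pvStepA (acc, false, none)).1 = acc ++ pvG true s ∧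
    (s.foldl pvStepA (acc, true, some '"')).1 = acc ++ pvG false s := by
  induction s with
  | nil => intro acc; simp [pvG]
  | cons c s ih =>
    intro acc
    constructor
    · rw [List.foldl_cons]
      by_cases hc : c = '"'
      · subst hc
        rw [pvStepA_out_quote, pvG, if_pos rfl]
        have := (ih (acc ++ ['"'])).2
        simpa using this
      · by_cases hq : c = '\''
        · subst hq
          rw [pvStepA_out_sq, pvG, if_neg (by decide)]
          have := (ih (acc ++ ['"'])).1
          simpa [pvRepC] using this
        · rw [pvStepA_out_other _ _ hc hq, pvG, if_neg hc]
          have := (ih (acc ++ [c])).1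
          simpa [pvRepC, hq] using this
    · rw [List.foldl_cons]
      by_cases hc : c = '"'
      · subst hc
        rw [pvStepA_in_quote, pvG, if_pos rfl]
        have := (ih (acc ++ ['"'])).1
        simpa using this
      · rw [pvStepA_in_other _ _ hc, pvG, if_neg hc]
        have := (ih (acc ++ [c])).2
        simpa using this

-- what B's parity-join produces (outside = true ↔ even segment index)
def pvJ (outside : Bool) : List (List Char) → List Char
  | [] => []
  | [p] => if outside then p.map pvRepC else p
  | p :: q :: rest => (if outside then p.map pvRepC else p) ++ '"' :: pvJ (!outside) (q :: rest)

theorem pvJoin_enumerate (parts : List (List Char)) : ∀ (i : Int),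
    PySem.Chars.join ['"']
      ((PySem.List.enumerate parts i).map
        (fun ip => if PySem.Int.mod ip.1 2 = 0 then PySem.Chars.replace ip.2 ['\''] ['"'] else ip.2))
    = pvJ (PySem.Int.mod i 2 == 0) parts := by
  induction parts with
  | nil => intro i; simp [PySem.List.enumerate_nil, PySem.Chars.join, List.intercalate, pvJ]
  | cons p rest ih =>
    intro i
    have hmod : PySem.Int.mod i 2 = i % 2 := PySem.Int.mod_eq_emod_of_pos (by omega)
    have hmod1 : PySem.Int.mod (i + 1) 2 = (i + 1) % 2 := PySem.Int.mod_eq_emod_of_pos (by omega)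
    have hflip : (PySem.Int.mod (i + 1) 2 == 0) = !(PySem.Int.mod i 2 == 0) := by
      rw [hmod, hmod1]
      have := Int.emod_two_eq i
      rcases this with h | h <;> simp [h] <;> omega
    rw [PySem.List.enumerate_cons, List.map_cons]
    cases rest with
    | nil =>
      simp only [PySem.List.enumerate_nil, List.map_nil, PySem.Chars.join, List.intercalate]
      by_cases h : PySem.Int.mod i 2 = 0
      · simp [pvJ, pvReplace_eq]
      · have hd : ¬ (2 ∣ i) := fun d => h (by rw [PySem.Int.mod_eq_zero_iff_dvd]; exact d)
        simp [hd, pvJ]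
    | cons q rest' =>
      have hcons : ∃ y t, (PySem.List.enumerate (q :: rest') (i + 1)).map
          (fun ip => if PySem.Int.mod ip.1 2 = 0 then PySem.Chars.replace ip.2 ['\''] ['"'] else ip.2) = y :: t := by
        simp [PySem.List.enumerate_cons]
      obtain ⟨y, t, hyt⟩ := hcons
      have hjoin : PySem.Chars.join ['"'] ((if PySem.Int.mod i 2 = 0 then PySem.Chars.replace p ['\''] ['"'] else p) :: y :: t)
          = (if PySem.Int.mod i 2 = 0 then PySem.Chars.replace p ['\''] ['"'] else p) ++ '"' :: PySem.Chars.join ['"'] (y :: t) := by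
        simp [PySem.Chars.join, List.intercalate]
      rw [hyt, hjoin, ← hyt, ih (i + 1), hflip]
      by_cases h : PySem.Int.mod i 2 = 0
      · simp [pvJ, pvReplace_eq]
      · have hd : ¬ (2 ∣ i) := fun d => h (by rw [PySem.Int.mod_eq_zero_iff_dvd]; exact d)
        simp [hd, pvJ]

theorem pvG_eq_J (s : List Char) : ∀ (b : Bool), pvG b s = pvJ b (pvMsplit s) := by
  induction s with
  | nil => intro b; cases b <;> simp [pvG, pvMsplit, pvJ]
  | cons c s ih =>
    intro b
    by_cases hc : c = '"'
    · subst hc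
      obtain ⟨h, t, hms⟩ : ∃ h t, pvMsplit s = h :: t := by
        cases hx : pvMsplit s with
        | nil => exact absurd hx (pvMsplit_ne_nil s)
        | cons h t => exact ⟨h, t, rfl⟩
      have hms' : pvMsplit ('"' :: s) = [] :: h :: t := by simp [pvMsplit, hms]
      have h1 : pvG b ('"' :: s) = '"' :: pvG (!b) s := by simp [pvG]
      have h2 : pvJ b ([] :: h :: t) = '"' :: pvJ (!b) (h :: t) := by
        cases b <;> simp [pvJ]
      rw [hms', h1, h2, ih (!b), hms]
    · obtain ⟨h, t, hms⟩ : ∃ h t, pvMsplit s = h :: t := by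
        cases hx : pvMsplit s with
        | nil => exact absurd hx (pvMsplit_ne_nil s)
        | cons h t => exact ⟨h, t, rfl⟩
      have hms' : pvMsplit (c :: s) = (c :: h) :: t := by simp [pvMsplit, hc, hms]
      have h1 : pvG b (c :: s) = (if b then pvRepC c else c) :: pvG b s := by
        simp [pvG, hc]
      have h2 : pvJ b ((c :: h) :: t) = (if b then pvRepC c else c) :: pvJ b (h :: t) := by
        cases t with
        | nil => cases b <;> simp [pvJ]
        | cons q t' => cases b <;> simp [pvJ]
      rw [hms', h1, h2, ih b, hms]

-- ===== VERDICT (by name: the statement is the Claim_ definition above) =====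
theorem fix_single_quotes_py_spec : Claim_equal_fix_single_quotes_py := by
  intro text _
  unfold Spec_fix_single_quotes_py fix_single_quotes_py fix_single_quotes_py_alt
  rw [(pvFoldA text.toList []).1, pvSplitOn_eq, pvJoin_enumerate _ 0]
  rw [show (PySem.Int.mod 0 2 == 0) = true by decide]
  rw [pvG_eq_J]
  simp
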